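-- pv_equiv track=rewrite | github.com/sajjad7114/hopfield-recycling | hopfield.py | create_w
-- ===== SOURCE A (Python) =====
-- def create_w(vec):
--     w = []
--     for i in range(len(vec)):
--         v = []
--         for j in range(len(vec)):
--             if i == j:
--                 v.append(0)
--             else:
--                 v.append(1 if vec[i] == vec[j] else -1)
--         w.append(v)
--     return w
-- ===== SOURCE B (Python) =====
-- def create_w(vec):
--     # Memoize one row pattern per distinct value: pattern[v][j] = 1 if vec[j] == v else -1.
--     # Each output row is a copy of its value's shared pattern with the diagonal entry zeroed.
--     patterns = {}
--     for x in vec: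
--         if x not in patterns:
--             patterns[x] = [1 if y == x else -1 for y in vec]
--     w = []
--     for i, x in enumerate(vec):
--         row = list(patterns[x])
--         row[i] = 0
--         w.append(row)
--     return w
-- ===== Notes on version B (the rewrite author's own statement) =====
-- stated objective: alternative
-- what changed: Instead of comparing vec[i]==vec[j] per ordered pair in nested loops, B computes one equality-pattern row per DISTINCT value (memoized in a dict) and builds each output row by copying the shared pattern and zeroing the diagonal entry.
import Mathlib
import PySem

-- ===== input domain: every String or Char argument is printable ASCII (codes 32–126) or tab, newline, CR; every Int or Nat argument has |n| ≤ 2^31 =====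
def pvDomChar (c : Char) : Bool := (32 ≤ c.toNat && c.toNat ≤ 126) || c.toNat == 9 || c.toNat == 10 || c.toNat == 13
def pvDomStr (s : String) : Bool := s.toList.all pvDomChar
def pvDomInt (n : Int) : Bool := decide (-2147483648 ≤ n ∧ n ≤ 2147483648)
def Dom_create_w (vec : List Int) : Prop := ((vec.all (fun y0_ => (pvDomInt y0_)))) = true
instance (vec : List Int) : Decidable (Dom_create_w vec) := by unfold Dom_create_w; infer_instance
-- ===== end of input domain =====

-- B memoizes one equality-pattern row per distinct value and copies it with the diagonal zeroed,
-- instead of A's per-pair nested-loop comparison; same result, alternative structure.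

-- ===== PORT A =====
def create_w (vec : List Int) : List (List Int) :=
  (PySem.List.pyRange 0 (vec.length : Int) 1).foldl (fun w i =>
    w ++ [(PySem.List.pyRange 0 (vec.length : Int) 1).foldl (fun v j =>
      v ++ [if i = j then (0 : Int)
            else if PySem.List.pyGetD vec i 0 = PySem.List.pyGetD vec j 0 then 1 else -1]) []]) []

-- ===== PORT B =====
def create_w_alt (vec : List Int) : List (List Int) :=
  let patterns : PySem.Dict Int (List Int) :=
    vec.foldl (fun d x =>
      if (d.get? x).isSome then d
      else d.insert x (vec.map (fun y => if y = x then (1 : Int) else -1))) PySem.Dict.empty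
  (PySem.List.enumerate vec).map (fun p => (patterns.getD p.2 []).set p.1.toNat 0)

-- ===== PRECONDITION & SPEC =====
def Spec_create_w (vec : List Int) (out : List (List Int)) : Prop := out = create_w_alt vec
instance (vec : List Int) (out : List (List Int)) : Decidable (Spec_create_w vec out) := by unfold Spec_create_w; infer_instance

-- ===== CLAIM (what is proved, stated in full; the proofs are below) =====
def Claim_equal_create_w : Prop := ∀ (vec : List Int), Dom_create_w vec → Spec_create_w vec (create_w vec)

-- ===== LEMMAS AND PROOFS =====

-- the shared pattern row for value x
def pvPat (vec : List Int) (x : Int) : List Int := vec.map (fun y => if y = x then (1 : Int) else -1)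

-- the if-absent-insert loop of B
def pvBuild (vec : List Int) (l : List Int) (d : PySem.Dict Int (List Int)) : PySem.Dict Int (List Int) :=
  l.foldl (fun d x => if (d.get? x).isSome then d else d.insert x (pvPat vec x)) d

lemma pvBuild_preserve (vec : List Int) (l : List Int) (d : PySem.Dict Int (List Int)) (k : Int)
    (h : (d.get? k).isSome) : ((pvBuild vec l d).get? k).isSome := by
  induction l generalizing d with
  | nil => simpa [pvBuild] using h
  | cons x t ih =>
    simp only [pvBuild, List.foldl_cons]
    apply ih
    split
    · exact h
    · rw [PySem.Dict.get?_insert]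
      split <;> simp_all

lemma pvBuild_mem (vec : List Int) (l : List Int) (d : PySem.Dict Int (List Int)) (k : Int)
    (h : k ∈ l) : ((pvBuild vec l d).get? k).isSome := by
  induction l generalizing d with
  | nil => simp at h
  | cons x t ih =>
    simp only [pvBuild, List.foldl_cons]
    rcases List.mem_cons.mp h with rfl | hk
    · apply pvBuild_preserve
      split
      · assumption
      · simp [PySem.Dict.get?_insert_self]
    · exact ih _ hk

lemma pvBuild_inv (vec : List Int) (l : List Int) (d : PySem.Dict Int (List Int))
    (hd : ∀ k v, d.get? k = some v → v = pvPat vec k) :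
    ∀ k v, (pvBuild vec l d).get? k = some v → v = pvPat vec k := by
  induction l generalizing d with
  | nil => simpa [pvBuild] using hd
  | cons x t ih =>
    simp only [pvBuild, List.foldl_cons]
    apply ih
    intro k v hv
    split at hv
    · exact hd k v hv
    · rw [PySem.Dict.get?_insert] at hv
      split at hv
      · cases hv; subst_vars; rfl
      · exact hd k v hv

lemma pvBuild_getD (vec : List Int) (k : Int) (h : k ∈ vec) :
    (pvBuild vec vec PySem.Dict.empty).getD k [] = pvPat vec k := by
  have hs := pvBuild_mem vec vec PySem.Dict.empty k h
  obtain ⟨v, hv⟩ := Option.isSome_iff_exists.mp hs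
  have := pvBuild_inv vec vec PySem.Dict.empty
    (by intro k v h; simp [PySem.Dict.get?_empty] at h) k v hv
  rw [PySem.Dict.getD_eq_get?_getD, hv, this]
  rfl

lemma create_w_alt_eq (vec : List Int) :
    create_w_alt vec =
      (PySem.List.enumerate vec).map (fun p => (pvPat vec p.2).set p.1.toNat 0) := by
  unfold create_w_alt
  apply List.map_congr_left
  intro p hp
  obtain ⟨k, hk, rfl⟩ := (PySem.List.mem_enumerate_iff _ _ _).mp hp
  have hmem : vec[k] ∈ vec := List.getElem_mem hk
  have : (pvBuild vec vec PySem.Dict.empty).getD vec[k] [] = pvPat vec vec[k] :=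
    pvBuild_getD vec _ hmem
  simpa [pvBuild, pvPat] using congrArg (fun r => r.set ((0 : Int) + (k : Int)).toNat 0) this

-- ===== VERDICT (by name: the statement is the Claim_ definition above) =====
theorem create_w_spec : Claim_equal_create_w := by
  intro vec _
  show create_w vec = create_w_alt vec
  rw [create_w_alt_eq]
  unfold create_w
  simp only [PySem.List.foldl_append_singleton_eq_map, List.nil_append]
  apply List.ext_getElem
  · simp [PySem.List.length_pyRange_one, PySem.List.length_enumerate]
  · intro i hi hi'
    simp only [List.getElem_map, PySem.List.getElem_pyRange_one, PySem.List.getElem_enumerate]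
    have hilen : i < vec.length := by
      simpa [PySem.List.length_pyRange_one] using hi
    apply List.ext_getElem
    · simp [PySem.List.length_pyRange_one, pvPat]
    · intro j hj hj'
      have hjlen : j < vec.length := by
        simpa [PySem.List.length_pyRange_one] using hj
      simp only [List.getElem_map, PySem.List.getElem_pyRange_one]
      rw [List.getElem_set]
      have hgi : PySem.List.pyGetD vec ((0 : Int) + (i : Int)) 0 = vec[i] := by
        rw [show ((0:Int) + (i:Int)) = (i:Int) by ring]
        rw [PySem.List.pyGetD_eq_getElem vec 0 (by omega) (by exact_mod_cast hilen)]
        simp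
      have hgj : PySem.List.pyGetD vec ((0 : Int) + (j : Int)) 0 = vec[j] := by
        rw [show ((0:Int) + (j:Int)) = (j:Int) by ring]
        rw [PySem.List.pyGetD_eq_getElem vec 0 (by omega) (by exact_mod_cast hjlen)]
        simp
      rw [hgi, hgj]
      simp only [pvPat, List.getElem_map]
      by_cases h : i = j
      · subst h
        simp
      · have h1 : ¬ ((0:Int) + (i:Int) = (0:Int) + (j:Int)) := by omega
        have h2 : ¬ (((0:Int) + (i:Int)).toNat = j) := by omega
        simp only [if_neg h1, if_neg h2]
        by_cases he : vec[i] = vec[j]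
        · simp [he]
        · simp [he, Ne.symm he]
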